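-- pv_equiv track=rewrite | github.com/coolihans/TIL | Algorithms/swea/L5203_HW_베이비진게임/이지수.py | is_run_or_triplet
-- ===== SOURCE A (Python) =====
-- def is_run_or_triplet(player_cards):
--     for i in range(len(player_cards)): # 첫번째 카드
--         for j in range(i+1, len(player_cards)): # 첫번째가 아닌 카드
--             for k in range(j+1, len(player_cards)): # 첫번째, 두번째 모두 아닌 카드
--                 # run
--                 if player_cards[i] == player_cards[j] == player_cards[k]:
--                     return True
--                 # triplet
--                 sorted_cards = sorted([player_cards[i], player_cards[j], player_cards[k]])
--                 if sorted_cards[0] + 1 == sorted_cards[1] and sorted_cards[1] + 1 == sorted_cards[2]: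
--                     return True
--     return False
-- ===== SOURCE B (Python) =====
-- def is_run_or_triplet(player_cards):
--     values = set(player_cards)
--     return any(
--         player_cards.count(v) >= 3 or (v + 1 in values and v + 2 in values)
--         for v in values
--     )
-- ===== Notes on version B (the rewrite author's own statement) =====
-- stated objective: faster
-- what changed: Replaced A's O(n^3) triple nested loop over index triples by a single pass over the distinct values (a set), reporting True iff some value occurs at least 3 times (triplet) or v, v+1, v+2 are all present (run).
import Mathlib
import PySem

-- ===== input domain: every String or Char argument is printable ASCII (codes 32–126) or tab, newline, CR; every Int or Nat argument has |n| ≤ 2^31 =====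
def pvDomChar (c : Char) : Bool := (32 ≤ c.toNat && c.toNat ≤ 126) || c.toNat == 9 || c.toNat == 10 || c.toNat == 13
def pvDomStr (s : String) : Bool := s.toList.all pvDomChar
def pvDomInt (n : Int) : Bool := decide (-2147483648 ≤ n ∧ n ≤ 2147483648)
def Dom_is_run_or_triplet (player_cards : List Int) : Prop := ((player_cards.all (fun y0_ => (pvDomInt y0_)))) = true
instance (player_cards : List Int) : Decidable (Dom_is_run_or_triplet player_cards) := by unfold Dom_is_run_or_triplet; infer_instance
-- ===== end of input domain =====

-- B replaces A's triple nested index loop by a single scan over the distinct values (set),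
-- testing count ≥ 3 (triplet) or presence of v, v+1, v+2 (run); objective: faster.

-- ===== PORT A =====
-- Triple nested loop over index ranges; indices produced by range(...) are always in
-- bounds, so pyGetD with default 0 is exact here.
def is_run_or_triplet (player_cards : List Int) : Bool :=
  (PySem.List.pyRange 0 (player_cards.length : Int) 1).any (fun i =>
    (PySem.List.pyRange (i + 1) (player_cards.length : Int) 1).any (fun j =>
      (PySem.List.pyRange (j + 1) (player_cards.length : Int) 1).any (fun k =>
        let ci := PySem.List.pyGetD player_cards i 0
        let cj := PySem.List.pyGetD player_cards j 0
        let ck := PySem.List.pyGetD player_cards k 0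
        if ci == cj && cj == ck then true
        else
          let sorted_cards := PySem.List.sorted [ci, cj, ck] (fun x => x)
          (PySem.List.pyGetD sorted_cards 0 0 + 1 == PySem.List.pyGetD sorted_cards 1 0) &&
            (PySem.List.pyGetD sorted_cards 1 0 + 1 == PySem.List.pyGetD sorted_cards 2 0))))

-- ===== PORT B =====
def is_run_or_triplet_alt (player_cards : List Int) : Bool :=
  let values : PySem.Set Int := PySem.Set.ofList player_cards
  values.any (fun v =>
    decide (3 ≤ PySem.List.count player_cards v) ||
      (PySem.Set.contains values (v + 1) && PySem.Set.contains values (v + 2)))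

-- ===== PRECONDITION & SPEC =====
def Spec_is_run_or_triplet (player_cards : List Int) (out : Bool) : Prop := out = is_run_or_triplet_alt player_cards
instance (player_cards : List Int) (out : Bool) : Decidable (Spec_is_run_or_triplet player_cards out) := by unfold Spec_is_run_or_triplet; infer_instance

-- ===== CLAIM (what is proved, stated in full; the proofs are below) =====
def Claim_equal_is_run_or_triplet : Prop := ∀ (player_cards : List Int), Dom_is_run_or_triplet player_cards → Spec_is_run_or_triplet player_cards (is_run_or_triplet player_cards)

-- ===== LEMMAS AND PROOFS =====

-- The loop body of A, as a function of the three card values.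
def pvBody3 (a b c : Int) : Bool :=
  if a == b && b == c then true
  else
    let s := PySem.List.sorted [a, b, c] (fun x => x)
    (PySem.List.pyGetD s 0 0 + 1 == PySem.List.pyGetD s 1 0) &&
      (PySem.List.pyGetD s 1 0 + 1 == PySem.List.pyGetD s 2 0)

-- the common semantic middle ground
def pvQ (pc : List Int) : Prop :=
  (∃ v, 3 ≤ pc.count v) ∨ (∃ v, v ∈ pc ∧ (v + 1) ∈ pc ∧ (v + 2) ∈ pc)

lemma pvBody3_iff (a b c : Int) :
    pvBody3 a b c = true ↔ (a = b ∧ b = c) ∨ ∃ m, ([a, b, c] : List Int).Perm [m, m + 1, m + 2] := by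
  unfold pvBody3
  by_cases h : a = b ∧ b = c
  · simp [h.1, h.2]
  · have hcond : (a == b && b == c) = false := by
      rcases not_and_or.mp h with h' | h' <;> simp [h']
    rw [hcond]
    simp only [Bool.false_eq_true, if_false]
    have hperm := PySem.List.sorted_perm [a, b, c] (fun x => x) false
    have hlen : (PySem.List.sorted [a, b, c] (fun x => x)).length = 3 := by
      rw [hperm.length_eq]; rfl
    obtain ⟨x, y, z, hs⟩ := List.length_eq_three.mp hlen
    rw [hs] at hperm ⊢
    simp only [Bool.and_eq_true, beq_iff_eq]
    have e0 : PySem.List.pyGetD ([x, y, z] : List Int) 0 0 = x := by simp [pysem]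
    have e1 : PySem.List.pyGetD ([x, y, z] : List Int) 1 0 = y := by simp [pysem]
    have e2 : PySem.List.pyGetD ([x, y, z] : List Int) 2 0 = z := by simp [pysem]
    rw [e0, e1, e2]
    constructor
    · rintro ⟨h1, h2⟩
      refine Or.inr ⟨x, ?_⟩
      have hxyz : [x, y, z] = [x, x + 1, x + 2] := by
        rw [show y = x + 1 by omega, show z = x + 2 by omega]
      exact (hxyz ▸ hperm).symm
    · rintro (⟨h1, h2⟩ | ⟨m, hp⟩)
      · exact absurd ⟨h1, h2⟩ h
      · have hpw : List.Pairwise (fun p q => (fun x => x) p < (fun x => x) q)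
            ([m, m + 1, m + 2] : List Int) := by simp
        have hsorted : PySem.List.sorted [a, b, c] (fun x => x) = [m, m + 1, m + 2] :=
          PySem.List.sorted_eq_of_perm_of_pairwise_lt [a, b, c] [m, m + 1, m + 2]
            (fun x => x) hp.symm hpw
        rw [hs] at hsorted
        obtain ⟨e1', e2', e3'⟩ : x = m ∧ y = m + 1 ∧ z = m + 2 := by
          simpa using hsorted
        subst e1'; subst e2'; subst e3'; omega

lemma pvA_iff (pc : List Int) :
    is_run_or_triplet pc = true ↔
      ∃ i j k : Nat, i < j ∧ j < k ∧ k < pc.length ∧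
        pvBody3 (pc.getD i 0) (pc.getD j 0) (pc.getD k 0) = true := by
  unfold is_run_or_triplet
  simp only [List.any_eq_true, PySem.List.mem_pyRange_one]
  constructor
  · rintro ⟨i, ⟨h0i, hin⟩, j, ⟨hij, hjn⟩, k, ⟨hjk, hkn⟩, hb⟩
    have hb' : pvBody3 (PySem.List.pyGetD pc i 0) (PySem.List.pyGetD pc j 0)
        (PySem.List.pyGetD pc k 0) = true := hb
    rw [show i = ((i.toNat : Nat) : Int) from (Int.toNat_of_nonneg h0i).symm,
        show j = ((j.toNat : Nat) : Int) from (Int.toNat_of_nonneg (by omega)).symm,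
        show k = ((k.toNat : Nat) : Int) from (Int.toNat_of_nonneg (by omega)).symm] at hb'
    simp only [PySem.List.pyGetD_natCast] at hb'
    exact ⟨i.toNat, j.toNat, k.toNat, by omega, by omega, by omega, hb'⟩
  · rintro ⟨i, j, k, hij, hjk, hk, hb⟩
    refine ⟨(i : Int), ⟨by positivity, by exact_mod_cast (by omega : i < pc.length)⟩,
            (j : Int), ⟨by exact_mod_cast (by omega : i + 1 ≤ j), by exact_mod_cast (by omega : j < pc.length)⟩,
            (k : Int), ⟨by exact_mod_cast (by omega : j + 1 ≤ k), by exact_mod_cast hk⟩, ?_⟩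
    show pvBody3 (PySem.List.pyGetD pc (i : Int) 0) (PySem.List.pyGetD pc (j : Int) 0)
        (PySem.List.pyGetD pc (k : Int) 0) = true
    simpa only [PySem.List.pyGetD_natCast] using hb

lemma pvB_iff (pc : List Int) : is_run_or_triplet_alt pc = true ↔ pvQ pc := by
  unfold is_run_or_triplet_alt pvQ
  simp only [List.any_eq_true, Bool.or_eq_true, Bool.and_eq_true, decide_eq_true_eq,
    PySem.Set.contains_iff, PySem.Set.mem_ofList, PySem.List.count_eq]
  constructor
  · rintro ⟨v, hv, h | ⟨h1, h2⟩⟩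
    · exact Or.inl ⟨v, h⟩
    · exact Or.inr ⟨v, hv, h1, h2⟩
  · rintro (⟨v, h⟩ | ⟨v, hv, h1, h2⟩)
    · exact ⟨v, List.count_pos_iff.mp (by omega), Or.inl h⟩
    · exact ⟨v, hv, Or.inr ⟨h1, h2⟩⟩

lemma pv_cons_sublist_drop (pc tail : List Int) (k : Nat) (hk : k < pc.length)
    (htail : List.Sublist tail (pc.drop (k + 1))) :
    ∀ d m, m ≤ k → k - m = d → List.Sublist (pc.getD k 0 :: tail) (pc.drop m) := by
  intro d
  induction d with
  | zero =>
    intro m hm hd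
    have hmk : m = k := by omega
    subst hmk
    rw [List.drop_eq_getElem_cons hk, List.getD_eq_getElem pc 0 hk]
    exact htail.cons₂ _
  | succ n ih =>
    intro m hm hd
    have hmlt : m < pc.length := by omega
    rw [List.drop_eq_getElem_cons hmlt]
    exact (ih (m + 1) (by omega) (by omega)).cons _

lemma pv_sub1_idx (pc : List Int) (a : Int) (h : List.Sublist [a] pc) :
    ∃ i, i < pc.length ∧ pc.getD i 0 = a := by
  induction pc with
  | nil => simp at h
  | cons x t ih =>
    cases h with
    | cons _ h' =>
      obtain ⟨i, hi, hv⟩ := ih h'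
      exact ⟨i + 1, by simpa using hi, by simpa using hv⟩
    | cons₂ _ h' => exact ⟨0, by simp, by simp⟩

lemma pv_sub2_idx (pc : List Int) (a b : Int) (h : List.Sublist [a, b] pc) :
    ∃ i j, i < j ∧ j < pc.length ∧ pc.getD i 0 = a ∧ pc.getD j 0 = b := by
  induction pc with
  | nil => simp at h
  | cons x t ih =>
    cases h with
    | cons _ h' =>
      obtain ⟨i, j, hij, hj, hva, hvb⟩ := ih h'
      exact ⟨i + 1, j + 1, by omega, by simpa using hj, by simpa using hva, by simpa using hvb⟩
    | cons₂ _ h' =>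
      obtain ⟨j, hj, hvb⟩ := pv_sub1_idx t b h'
      exact ⟨0, j + 1, by omega, by simpa using hj, by simp, by simpa using hvb⟩

lemma pv_sub3_idx (pc : List Int) (a b c : Int) (h : List.Sublist [a, b, c] pc) :
    ∃ i j k, i < j ∧ j < k ∧ k < pc.length ∧
      pc.getD i 0 = a ∧ pc.getD j 0 = b ∧ pc.getD k 0 = c := by
  induction pc with
  | nil => simp at h
  | cons x t ih =>
    cases h with
    | cons _ h' =>
      obtain ⟨i, j, k, hij, hjk, hk, hva, hvb, hvc⟩ := ih h'
      exact ⟨i + 1, j + 1, k + 1, by omega, by omega, by simpa using hk,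
        by simpa using hva, by simpa using hvb, by simpa using hvc⟩
    | cons₂ _ h' =>
      obtain ⟨j, k, hjk, hk, hvb, hvc⟩ := pv_sub2_idx t b c h'
      exact ⟨0, j + 1, k + 1, by omega, by omega, by simpa using hk,
        by simp, by simpa using hvb, by simpa using hvc⟩

lemma pv_order3 (i j k : Nat) (hij : i ≠ j) (hik : i ≠ k) (hjk : j ≠ k) :
    ∃ p q r : Nat, p < q ∧ q < r ∧ ([p, q, r] : List Nat).Perm [i, j, k] := by
  rcases Nat.lt_trichotomy i j with h1 | h1 | h1
  · rcases Nat.lt_trichotomy j k with h2 | h2 | h2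
    · exact ⟨i, j, k, h1, h2, List.Perm.refl _⟩
    · exact absurd h2 hjk
    · rcases Nat.lt_trichotomy i k with h3 | h3 | h3
      · exact ⟨i, k, j, h3, h2, (List.Perm.swap j k []).cons i⟩
      · exact absurd h3 hik
      · exact ⟨k, i, j, h3, h1, (List.Perm.swap i k [j]).trans ((List.Perm.swap j k []).cons i)⟩
  · exact absurd h1 hij
  · rcases Nat.lt_trichotomy i k with h2 | h2 | h2
    · exact ⟨j, i, k, h1, h2, List.Perm.swap i j [k]⟩
    · exact absurd h2 hik
    · rcases Nat.lt_trichotomy j k with h3 | h3 | h3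
      · exact ⟨j, k, i, h3, h2, ((List.Perm.swap i k []).cons j).trans (List.Perm.swap i j [k])⟩
      · exact absurd h3 hjk
      · exact ⟨k, j, i, h3, h1,
          ((List.Perm.swap j k [i]).trans ((List.Perm.swap i k []).cons j)).trans
            (List.Perm.swap i j [k])⟩

lemma pvA_iff_Q (pc : List Int) : is_run_or_triplet pc = true ↔ pvQ pc := by
  rw [pvA_iff]
  constructor
  · rintro ⟨i, j, k, hij, hjk, hk, hb⟩
    have hi : i < pc.length := by omega
    have hj : j < pc.length := by omega
    have hsub : List.Sublist [pc.getD i 0, pc.getD j 0, pc.getD k 0] pc := by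
      have s1 := pv_cons_sublist_drop pc [] k hk (List.nil_sublist _)
        (k - (j + 1)) (j + 1) (by omega) rfl
      have s2 := pv_cons_sublist_drop pc [pc.getD k 0] j hj s1
        (j - (i + 1)) (i + 1) (by omega) rfl
      have s3 := pv_cons_sublist_drop pc [pc.getD j 0, pc.getD k 0] i hi s2
        i 0 (by omega) rfl
      simpa using s3
    rw [pvBody3_iff] at hb
    rcases hb with ⟨h1, h2⟩ | ⟨m, hperm⟩
    · rw [h1, h2] at hsub
      exact Or.inl ⟨pc.getD k 0, List.replicate_sublist_iff.mp hsub⟩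
    · have hmm : ∀ x ∈ ([m, m + 1, m + 2] : List Int), x ∈ pc := by
        intro x hx
        exact hsub.mem (hperm.mem_iff.mpr hx)
      exact Or.inr ⟨m, hmm m (by simp), hmm (m + 1) (by simp), hmm (m + 2) (by simp)⟩
  · rintro (⟨v, hc⟩ | ⟨v, h0, h1, h2⟩)
    · have hs : List.Sublist [v, v, v] pc := List.replicate_sublist_iff.mpr hc
      obtain ⟨i, j, k, hij, hjk, hk, hva, hvb, hvc⟩ := pv_sub3_idx pc v v v hs
      exact ⟨i, j, k, hij, hjk, hk, by rw [hva, hvb, hvc]; simp [pvBody3]⟩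
    · obtain ⟨i1, hl1, hv1⟩ := List.mem_iff_getElem.mp h0
      obtain ⟨i2, hl2, hv2⟩ := List.mem_iff_getElem.mp h1
      obtain ⟨i3, hl3, hv3⟩ := List.mem_iff_getElem.mp h2
      have d12 : i1 ≠ i2 := by rintro rfl; rw [hv1] at hv2; omega
      have d13 : i1 ≠ i3 := by rintro rfl; rw [hv1] at hv3; omega
      have d23 : i2 ≠ i3 := by rintro rfl; rw [hv2] at hv3; omega
      obtain ⟨p, q, r, hpq, hqr, hperm⟩ := pv_order3 i1 i2 i3 d12 d13 d23
      have hbnd : ∀ x ∈ ([p, q, r] : List Nat), x < pc.length := by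
        intro x hx
        have := hperm.mem_iff.mp hx
        simp at this
        rcases this with rfl | rfl | rfl <;> assumption
      have hr : r < pc.length := hbnd r (by simp)
      have hmap : ([pc.getD p 0, pc.getD q 0, pc.getD r 0] : List Int).Perm
          [pc.getD i1 0, pc.getD i2 0, pc.getD i3 0] := by
        simpa using hperm.map (fun t => pc.getD t 0)
      have hv1' : pc.getD i1 0 = v := by rw [List.getD_eq_getElem pc 0 hl1]; exact hv1
      have hv2' : pc.getD i2 0 = v + 1 := by rw [List.getD_eq_getElem pc 0 hl2]; exact hv2
      have hv3' : pc.getD i3 0 = v + 2 := by rw [List.getD_eq_getElem pc 0 hl3]; exact hv3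
      refine ⟨p, q, r, hpq, hqr, hr, pvBody3_iff _ _ _ |>.mpr (Or.inr ⟨v, ?_⟩)⟩
      rw [hv1', hv2', hv3'] at hmap
      exact hmap

-- ===== VERDICT (by name: the statement is the Claim_ definition above) =====
theorem is_run_or_triplet_spec : Claim_equal_is_run_or_triplet := by
  intro pc _
  unfold Spec_is_run_or_triplet
  have hA := pvA_iff_Q pc
  have hB := pvB_iff pc
  cases hA' : is_run_or_triplet pc with
  | true => exact ((hB.mpr (hA.mp hA')).symm)
  | false =>
    cases hB' : is_run_or_triplet_alt pc with
    | true => exact absurd (hA.mpr (hB.mp hB')) (by simp [hA'])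
    | false => rfl
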